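-- pv_equiv track=rewrite | github.com/kbdonnally/TBTA-timeline | python/funcs.py | createPicNames
-- ===== SOURCE A (Python) =====
-- def createPicNames(sources):
-- 	picnames = []
-- 	for s in sources:
-- 		if s == 'Federal response':
-- 			picnames.append('govt')
-- 		elif s == 'Student response':
-- 			picnames.append('students')
-- 		else:
-- 			picnames.append('rotunda')
-- 	return picnames
-- ===== SOURCE B (Python) =====
-- def createPicNames(sources):
--     # Pre-fill the whole result with the default, then patch matched positions
--     # in one staged pass per special label.
--     picnames = ['rotunda'] * len(sources)
--     for key, name in (('Federal response', 'govt'), ('Student response', 'students')):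
--         for i, s in enumerate(sources):
--             if s == key:
--                 picnames[i] = name
--     return picnames
-- ===== Notes on version B (the rewrite author's own statement) =====
-- stated objective: alternative
-- what changed: Instead of branching per element while appending, B allocates the full result pre-filled with the default 'rotunda' and then runs one staged pass per special label, overwriting the matched indices in place.
import Mathlib
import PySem

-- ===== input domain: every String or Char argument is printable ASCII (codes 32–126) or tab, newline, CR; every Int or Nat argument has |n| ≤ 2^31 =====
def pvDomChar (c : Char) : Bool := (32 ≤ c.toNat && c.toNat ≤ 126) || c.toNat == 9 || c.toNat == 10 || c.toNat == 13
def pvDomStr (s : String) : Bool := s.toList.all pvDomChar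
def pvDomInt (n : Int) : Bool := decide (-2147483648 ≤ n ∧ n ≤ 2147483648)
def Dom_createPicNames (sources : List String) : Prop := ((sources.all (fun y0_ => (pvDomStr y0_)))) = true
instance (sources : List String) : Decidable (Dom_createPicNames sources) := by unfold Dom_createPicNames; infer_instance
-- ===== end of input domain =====

-- B builds the full result pre-filled with the default 'rotunda' and then patches matched
-- indices in one staged pass per special label (alternative decomposition, same cost).


-- ===== PORT A =====
def createPicNames (sources : List String) : List String :=
  sources.foldl (fun picnames s =>
    if s = "Federal response" then picnames ++ ["govt"]
    else if s = "Student response" then picnames ++ ["students"]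
    else picnames ++ ["rotunda"]) []

-- ===== PORT B =====
-- inner pass: for i, s in enumerate(sources): if s == key: picnames[i] = name
def patchPass (sources : List String) (key name : String) (picnames : List String) : List String :=
  (PySem.List.enumerate sources).foldl
    (fun pn p => if p.2 = key then pn.set p.1.toNat name else pn) picnames

def createPicNames_alt (sources : List String) : List String :=
  [("Federal response", "govt"), ("Student response", "students")].foldl
    (fun picnames kv => patchPass sources kv.1 kv.2 picnames)
    (PySem.List.pyRepeat ["rotunda"] (sources.length : Int))

-- ===== PRECONDITION & SPEC =====
def Spec_createPicNames (sources : List String) (out : List String) : Prop := out = createPicNames_alt sources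
instance (sources : List String) (out : List String) : Decidable (Spec_createPicNames sources out) := by unfold Spec_createPicNames; infer_instance

-- ===== CLAIM (what is proved, stated in full; the proofs are below) =====
def Claim_equal_createPicNames : Prop := ∀ (sources : List String), Dom_createPicNames sources → Spec_createPicNames sources (createPicNames sources)

-- ===== LEMMAS AND PROOFS =====

theorem length_patchPass_aux (key name : String) (l : List (Int × String)) (acc : List String) :
    (l.foldl (fun pn p => if p.2 = key then pn.set p.1.toNat name else pn) acc).length = acc.length := by
  induction l generalizing acc with
  | nil => rfl
  | cons x xs ih => simp only [List.foldl_cons]; split_ifs <;> simp [ih]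

theorem getElem?_patchPass (key name : String) :
    ∀ (l : List String) (s : Nat) (acc : List String) (j : Nat),
      (( (PySem.List.enumerate l (s : Int)).foldl
          (fun pn p => if p.2 = key then pn.set p.1.toNat name else pn) acc)[j]?) =
        if s ≤ j ∧ j < s + l.length ∧ l[j - s]? = some key ∧ j < acc.length
        then some name else acc[j]? := by
  intro l
  induction l with
  | nil =>
    intro s acc j
    simp only [PySem.List.enumerate_nil, List.foldl_nil, List.length_nil]
    rw [if_neg (by rintro ⟨h1, h2, -⟩; omega)]
  | cons x xs ih =>
    intro s acc j
    rw [PySem.List.enumerate_cons]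
    simp only [List.foldl_cons, List.length_cons]
    have hcast : ((s : Int)).toNat = s := Int.toNat_natCast s
    have hcast1 : ((s : Int) + 1) = ((s + 1 : Nat) : Int) := by push_cast; ring
    rw [hcast1]
    by_cases hx : x = key
    · subst hx
      rw [if_pos rfl, hcast, ih (s+1), List.length_set]
      by_cases hj : j = s
      · subst hj
        rw [if_neg (by rintro ⟨h1, -⟩; omega)]
        by_cases hlen : j < acc.length
        · rw [if_pos ⟨le_refl j, by omega, by simp, hlen⟩]
          simp [hlen]
        · rw [if_neg (by rintro ⟨-, -, -, h⟩; omega)]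
          rw [List.set_eq_of_length_le (by omega)]
      · rw [List.getElem?_set_ne (fun h => hj h.symm)]
        refine if_congr ?_ rfl rfl
        constructor
        · rintro ⟨h1, h2, h3, h4⟩
          have hd : j - s = (j - (s+1)) + 1 := by omega
          refine ⟨by omega, by omega, ?_, h4⟩
          rw [hd, List.getElem?_cons_succ]; exact h3
        · rintro ⟨h1, h2, h3, h4⟩
          have hs1 : s + 1 ≤ j := by omega
          have hd : j - s = (j - (s+1)) + 1 := by omega
          rw [hd, List.getElem?_cons_succ] at h3
          exact ⟨hs1, by omega, h3, h4⟩
    · rw [if_neg hx, ih (s+1)]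
      by_cases hj : j = s
      · subst hj
        rw [if_neg (by rintro ⟨h1, -⟩; omega)]
        rw [if_neg (by rintro ⟨-, -, h3, -⟩; rw [Nat.sub_self, List.getElem?_cons_zero] at h3; exact hx (Option.some.inj h3))]
      · refine if_congr ?_ rfl rfl
        constructor
        · rintro ⟨h1, h2, h3, h4⟩
          have hd : j - s = (j - (s+1)) + 1 := by omega
          refine ⟨by omega, by omega, ?_, h4⟩
          rw [hd, List.getElem?_cons_succ]; exact h3
        · rintro ⟨h1, h2, h3, h4⟩
          have hs1 : s + 1 ≤ j := by omega
          have hd : j - s = (j - (s+1)) + 1 := by omega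
          rw [hd, List.getElem?_cons_succ] at h3
          exact ⟨hs1, by omega, h3, h4⟩

-- A as a per-element map (characterisation of A's appending loop)
theorem createPicNames_eq_map (sources : List String) (acc : List String) :
    sources.foldl (fun picnames s =>
      if s = "Federal response" then picnames ++ ["govt"]
      else if s = "Student response" then picnames ++ ["students"]
      else picnames ++ ["rotunda"]) acc
    = acc ++ sources.map (fun s =>
        if s = "Federal response" then "govt"
        else if s = "Student response" then "students" else "rotunda") := by
  induction sources generalizing acc with
  | nil => simp
  | cons h t ih =>
    simp only [List.foldl_cons, List.map_cons, ih]
    split_ifs <;> simp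

theorem createPicNames_spec : Claim_equal_createPicNames := by
  intro sources _
  unfold Spec_createPicNames createPicNames createPicNames_alt
  rw [createPicNames_eq_map, List.nil_append]
  simp only [List.foldl_cons, List.foldl_nil]
  have hrep : PySem.List.pyRepeat ["rotunda"] (sources.length : Int)
      = List.replicate sources.length "rotunda" := by
    rw [PySem.List.pyRepeat_singleton, Int.toNat_natCast]
  rw [hrep]
  apply List.ext_getElem?
  intro j
  unfold patchPass
  have h0 : ((0 : Nat) : Int) = (0 : Int) := rfl
  rw [← h0, getElem?_patchPass]
  have hlen1 : (List.replicate sources.length "rotunda").length = sources.length := by simp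
  by_cases hj : j < sources.length
  · rw [getElem?_patchPass]
    have hr : (List.replicate sources.length ("rotunda" : String))[j]? = some "rotunda" := by
      simp [hj]
    have hx' : sources[j]? = some sources[j] := List.getElem?_eq_getElem hj
    rw [List.getElem?_map, hx']
    simp only [Nat.zero_add, Nat.sub_zero, Nat.zero_le, true_and, hlen1, hj, and_true, hx',
      length_patchPass_aux]
    by_cases h1 : sources[j] = "Federal response"
    · simp [h1]
    · by_cases h2 : sources[j] = "Student response"
      · simp [h2]
      · simp [h1, h2, hr]
  · have hA : (sources.map (fun s =>
        if s = "Federal response" then "govt"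
        else if s = "Student response" then "students" else "rotunda"))[j]? = none := by
      simp; omega
    have hB1 : ¬ (0 ≤ j ∧ j < 0 + sources.length ∧ sources[j - 0]? = some "Student response" ∧
        j < ((PySem.List.enumerate sources ((0:Nat):Int)).foldl
          (fun pn p => if p.2 = "Federal response" then pn.set p.1.toNat "govt" else pn)
          (List.replicate sources.length "rotunda")).length) := by
      intro h; omega
    rw [hA, if_neg hB1, getElem?_patchPass]
    have hB2 : ¬ (0 ≤ j ∧ j < 0 + sources.length ∧ sources[j - 0]? = some "Federal response" ∧
        j < (List.replicate sources.length ("rotunda" : String)).length) := by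
      intro h; omega
    rw [if_neg hB2]
    simp
    omega
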